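-- pv_equiv track=rewrite | github.com/ElofssonLab/evolutionary_rates | same_topology.py | get_passed_uids
-- ===== SOURCE A (Python) =====
-- def get_passed_uids(failed_pdb_filter, sequences, topologies):
--     '''Get the uids that passed the pdb filter and group them in topologies
--     '''
--
--     #Get passed uids
--     failed_uids = [*failed_pdb_filter[0]]
--     passed_uids = []
--     for uid in sequences:
--         if uid in failed_uids:
--             continue
--         else:
--             passed_uids.append(uid)
--
--     #Group the passed uids by topology
--     passed_uids_grouped = {} #Sequences grouped by H-group
--     for uid in passed_uids:
--         topology = topologies[uid]
--         if topology not in passed_uids_grouped.keys(): #If not in new dict - add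
--             passed_uids_grouped[topology] = [uid]
--         else:
--             passed_uids_grouped[topology].append(uid) #Otherwise append
--
--
--     return passed_uids_grouped
-- ===== SOURCE B (Python) =====
-- def get_passed_uids(failed_pdb_filter, sequences, topologies):
--     '''Get the uids that passed the pdb filter and group them in topologies
--     '''
--     failed = set(failed_pdb_filter[0])
--     passed = [uid for uid in sequences if uid not in failed]
--     order = dict.fromkeys(topologies[uid] for uid in passed)
--     return {t: [uid for uid in passed if topologies[uid] == t] for t in order}
-- ===== Notes on version B (the rewrite author's own statement) =====
-- stated objective: alternative
-- what changed: Replaces A's incremental dict-building loop (insert-or-append per uid) with a declarative group-by: filter passed uids once, take the first-occurrence-ordered list of their topologies, and build each bucket by a per-topology filter comprehension.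
import Mathlib
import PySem

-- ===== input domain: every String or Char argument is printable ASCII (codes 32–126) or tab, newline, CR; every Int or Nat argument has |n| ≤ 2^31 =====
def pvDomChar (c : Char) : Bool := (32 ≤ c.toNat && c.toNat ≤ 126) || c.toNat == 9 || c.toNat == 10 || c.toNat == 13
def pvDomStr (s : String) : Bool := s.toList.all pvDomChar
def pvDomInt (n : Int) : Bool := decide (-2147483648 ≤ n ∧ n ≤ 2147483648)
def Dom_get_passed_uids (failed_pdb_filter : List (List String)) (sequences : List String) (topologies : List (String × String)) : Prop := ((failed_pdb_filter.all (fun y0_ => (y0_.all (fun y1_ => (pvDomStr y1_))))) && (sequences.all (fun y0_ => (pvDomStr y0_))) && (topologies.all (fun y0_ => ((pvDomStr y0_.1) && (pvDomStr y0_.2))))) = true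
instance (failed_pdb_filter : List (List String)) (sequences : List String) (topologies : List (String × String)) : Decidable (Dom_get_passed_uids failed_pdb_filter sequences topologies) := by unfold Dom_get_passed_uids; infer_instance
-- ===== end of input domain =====

-- B replaces A's incremental insert-or-append dict loop by a declarative group-by
-- (first-occurrence topology order, one filter per topology); same cost class, no speed claim.

-- ===== PORT A =====
def get_passed_uids (failed_pdb_filter : List (List String)) (sequences : List String) (topologies : List (String × String)) : List (String × List String) :=
  let failed_uids : List String := (PySem.List.pyGet? failed_pdb_filter 0).getD []
  let passed_uids : List String :=
    sequences.foldl (fun acc uid => if failed_uids.contains uid then acc else acc ++ [uid]) []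
  let grouped : PySem.Dict String (List String) :=
    passed_uids.foldl (fun d uid =>
      let topology := (PySem.Dict.get? (PySem.Dict.mk topologies) uid).getD ""
      if (PySem.Dict.keys d).contains topology then
        d.modify topology [] (fun l => l ++ [uid])
      else
        d.insert topology [uid]) PySem.Dict.empty
  grouped.items

-- ===== PORT B =====
def get_passed_uids_alt (failed_pdb_filter : List (List String)) (sequences : List String) (topologies : List (String × String)) : List (String × List String) :=
  let failed : PySem.Set String := PySem.Set.ofList ((PySem.List.pyGet? failed_pdb_filter 0).getD [])
  let passed : List String := sequences.filter (fun uid => !(PySem.Set.contains failed uid))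
  let topo : String → String := fun uid => (PySem.Dict.get? (PySem.Dict.mk topologies) uid).getD ""
  let order : List String := PySem.List.dedup (passed.map topo)
  order.map (fun t => (t, passed.filter (fun uid => topo uid == t)))

-- ===== PRECONDITION & SPEC =====
-- Pre_ excludes exactly the inputs where Python A raises: empty failed_pdb_filter
-- (IndexError on failed_pdb_filter[0]) and a passed uid missing from topologies (KeyError).
def Pre_get_passed_uids (failed_pdb_filter : List (List String)) (sequences : List String) (topologies : List (String × String)) : Prop :=
  failed_pdb_filter ≠ [] ∧
  ∀ uid ∈ sequences, uid ∉ failed_pdb_filter.headD [] → uid ∈ topologies.map Prod.fst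
instance (failed_pdb_filter : List (List String)) (sequences : List String) (topologies : List (String × String)) : Decidable (Pre_get_passed_uids failed_pdb_filter sequences topologies) := by unfold Pre_get_passed_uids; infer_instance
def pvWitness_get_passed_uids : List (List String) × List String × (List (String × String)) :=
  ([["x"]], ["u", "x", "v", "w"], [("u", "a"), ("v", "b"), ("w", "a")])

def Spec_get_passed_uids (failed_pdb_filter : List (List String)) (sequences : List String) (topologies : List (String × String)) (out : List (String × List String)) : Prop := out = get_passed_uids_alt failed_pdb_filter sequences topologies
instance (failed_pdb_filter : List (List String)) (sequences : List String) (topologies : List (String × String)) (out : List (String × List String)) : Decidable (Spec_get_passed_uids failed_pdb_filter sequences topologies out) := by unfold Spec_get_passed_uids; infer_instance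

-- ===== CLAIM (what is proved, stated in full; the proofs are below) =====
def Claim_equal_get_passed_uids : Prop := ∀ (failed_pdb_filter : List (List String)) (sequences : List String) (topologies : List (String × String)), Dom_get_passed_uids failed_pdb_filter sequences topologies → Pre_get_passed_uids failed_pdb_filter sequences topologies → Spec_get_passed_uids failed_pdb_filter sequences topologies (get_passed_uids failed_pdb_filter sequences topologies)


-- ===== LEMMAS AND PROOFS =====
-- A's 'not yet a key' insert branch is exactly modify-with-default-[].
theorem pv_step_eq (d : PySem.Dict String (List String)) (t uid : String)
    (h : (PySem.Dict.keys d).contains t = false) :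
    d.insert t [uid] = d.modify t [] (fun l => l ++ [uid]) := by
  have hc : d.contains t = false := by
    rw [Bool.eq_false_iff]; intro hT
    rw [PySem.Dict.contains_iff_mem_keys] at hT
    simp at h; exact h hT
  simp [PySem.Dict.modify, PySem.Dict.insert, hc, PySem.Dict.getD_of_not_contains d [] hc]

-- Keys of A's grouping fold are the first-occurrence topologies, i.e. B's 'order'.
theorem pv_keys_eq (passed : List String) (topo : String → String) :
    (passed.foldl (fun d u => d.modify (topo u) [] (fun l => l ++ [u])) PySem.Dict.empty).keys
      = PySem.List.dedup (passed.map topo) := by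
  rw [PySem.Dict.keys_foldl_modify_key (key := topo)]
  simp [pysem, PySem.Set.update_nil_left, PySem.Dict.keys_empty]

-- Each bucket of A's grouping fold is B's per-topology filter.
theorem pv_getD_eq (passed : List String) (topo : String → String) (c : String) :
    (passed.foldl (fun d u => d.modify (topo u) [] (fun l => l ++ [u])) PySem.Dict.empty).getD c []
      = passed.filter (fun u => topo u == c) := by
  have hp : (passed.foldl (fun d u => d.modify (topo u) [] (fun l => l ++ [u])) PySem.Dict.empty)
      = (passed.map (fun u => (topo u, u))).foldl
          (fun d p => d.modify p.1 [] (fun l => l ++ [p.2])) PySem.Dict.empty := by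
    rw [List.foldl_map]
  rw [hp, PySem.Dict.getD_foldl_modify_append]
  simp [List.filter_map, List.map_map, Function.comp_def]

theorem pv_ports_eq (fpf : List (List String)) (seqs : List String) (topos : List (String × String)) :
    get_passed_uids fpf seqs topos = get_passed_uids_alt fpf seqs topos := by
  unfold get_passed_uids get_passed_uids_alt
  simp only []
  set fl : List String := (PySem.List.pyGet? fpf 0).getD [] with hfl
  set topo : String → String := fun uid => (PySem.Dict.get? (PySem.Dict.mk topos) uid).getD "" with htopo
  -- the two 'passed' lists agree
  have hpassed : seqs.foldl (fun acc uid => if fl.contains uid then acc else acc ++ [uid]) []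
      = seqs.filter (fun uid => !(PySem.Set.contains (PySem.Set.ofList fl) uid)) := by
    have h1 : seqs.foldl (fun acc uid => if fl.contains uid then acc else acc ++ [uid]) []
        = seqs.foldl (fun acc uid => if !fl.contains uid then acc ++ [uid] else acc) [] := by
      apply PySem.List.foldl_congr_mem
      intro acc x _
      cases h : fl.contains x
      · simp
      · simp
    rw [h1, PySem.List.foldl_append_if_eq_filter]
    simp only [List.nil_append]
    apply List.filter_congr
    intro x _
    simp [pysem]
  rw [hpassed]
  set passed := seqs.filter (fun uid => !(PySem.Set.contains (PySem.Set.ofList fl) uid))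
  -- A's grouping fold is a plain modify fold
  have hstep : passed.foldl (fun d uid =>
        if (PySem.Dict.keys d).contains (topo uid) then
          d.modify (topo uid) [] (fun l => l ++ [uid])
        else d.insert (topo uid) [uid]) PySem.Dict.empty
      = passed.foldl (fun d uid => d.modify (topo uid) [] (fun l => l ++ [uid])) PySem.Dict.empty := by
    apply PySem.List.foldl_congr_mem
    intro d uid _
    cases h : (PySem.Dict.keys d).contains (topo uid)
    · simp [pv_step_eq d (topo uid) uid h]
    · simp
  rw [hstep]
  have hnd : (passed.foldl (fun d uid => d.modify (topo uid) [] (fun l => l ++ [uid]))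
      PySem.Dict.empty).keys.Nodup :=
    PySem.Dict.nodup_keys_foldl_modify_key passed topo [] (fun _ u => fun l => l ++ [u])
      PySem.Dict.empty (by simp [PySem.Dict.keys_empty])
  rw [PySem.Dict.items_eq_map_keys _ hnd []]
  rw [pv_keys_eq passed topo]
  apply List.map_congr_left
  intro t _
  rw [pv_getD_eq passed topo t]

-- ===== VERDICT (by name: the statement is the Claim_ definition above) =====
theorem get_passed_uids_spec : Claim_equal_get_passed_uids := by
  intro fpf seqs topos _ _
  unfold Spec_get_passed_uids
  exact pv_ports_eq fpf seqs topos
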